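-- pv_equiv track=rewrite | github.com/posl/comment_recommendation | script/mod_gen/5_time/en/269_C/2.py | check
-- ===== SOURCE A (Python) =====
-- def check(x, n):
--     while x > 0:
--         if x & 1:
--             if n & 1 == 0:
--                 return False
--         x >>= 1
--         n >>= 1
--     return True
-- ===== SOURCE B (Python) =====
-- def check(x, n):
--     # every set bit of x must also be set in n; for x < 0 the original loop
--     # never runs, and the bitwise test is replaced by the trivial True
--     return x < 0 or (x & ~n) == 0
-- ===== Notes on version B (the rewrite author's own statement) =====
-- stated objective: simpler
-- what changed: Replaced the bit-by-bit while loop with the single closed-form bitwise test (x & ~n) == 0 (with x < 0 giving True, as the loop never runs there).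
import Mathlib
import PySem

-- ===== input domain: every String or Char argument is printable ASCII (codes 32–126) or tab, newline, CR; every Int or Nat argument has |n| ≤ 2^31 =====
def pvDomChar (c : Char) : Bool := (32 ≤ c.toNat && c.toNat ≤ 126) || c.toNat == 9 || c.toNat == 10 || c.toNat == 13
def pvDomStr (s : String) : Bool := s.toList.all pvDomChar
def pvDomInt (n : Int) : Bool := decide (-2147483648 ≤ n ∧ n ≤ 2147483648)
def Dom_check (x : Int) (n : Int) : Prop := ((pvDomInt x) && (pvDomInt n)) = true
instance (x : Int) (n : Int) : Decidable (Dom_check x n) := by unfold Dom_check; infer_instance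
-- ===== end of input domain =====

-- B replaces A's bit-by-bit loop by the single closed-form test (x & ~n) == 0 (x < 0 ⇒ True, as A's loop never runs there); return-value equivalence proved for all ints.

-- lemma the port's termination proof cites (shift right by one is floor halving)
theorem pv_shiftRight_one (x : Int) : Int.shiftRight x 1 = x / 2 := by
  cases x with
  | ofNat m =>
      show Int.ofNat (m >>> 1) = Int.ofNat m / 2
      rw [Nat.shiftRight_eq_div_pow]
      simp
  | negSucc m =>
      show Int.negSucc (m >>> 1) = Int.negSucc m / 2
      rw [Nat.shiftRight_eq_div_pow, Int.negSucc_eq]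
      simp only [pow_one]
      omega

-- ===== PORT A =====
def check (x : Int) (n : Int) : Bool :=
  if 0 < x then
    if Int.land x 1 ≠ 0 then
      if Int.land n 1 = 0 then false
      else check (Int.shiftRight x 1) (Int.shiftRight n 1)
    else check (Int.shiftRight x 1) (Int.shiftRight n 1)
  else true
termination_by x.toNat
decreasing_by
  all_goals
    rw [pv_shiftRight_one]
    omega

-- ===== PORT B =====
def check_alt (x : Int) (n : Int) : Bool :=
  decide (x < 0) || decide (Int.land x (Int.lnot n) = 0)

-- ===== PRECONDITION & SPEC =====
def Spec_check (x : Int) (n : Int) (out : Bool) : Prop := out = check_alt x n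
instance (x : Int) (n : Int) (out : Bool) : Decidable (Spec_check x n out) := by unfold Spec_check; infer_instance

-- ===== CLAIM (what is proved, stated in full; the proofs are below) =====
def Claim_equal_check : Prop := ∀ (x : Int) (n : Int), Dom_check x n → Spec_check x n (check x n)

-- ===== LEMMAS AND PROOFS =====

theorem pv_bit_eq_zero (b : Bool) (m : Int) : (Int.bit b m = 0) ↔ (b = false ∧ m = 0) := by
  rw [Int.bit_val]
  cases b <;> simp <;> omega

theorem pv_land_lnot_rec (x n : Int) :
    Int.land x (Int.lnot n) = Int.bit (x.bodd && !n.bodd) (Int.land x.div2 (Int.lnot n.div2)) := by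
  conv_lhs => rw [← Int.bit_decomp x, ← Int.bit_decomp n]
  rw [Int.lnot_bit, Int.land_bit]

theorem pv_land_zero_right (a : Int) : Int.land a 0 = 0 := by
  cases a <;> simp [Int.land, Nat.ldiff, Nat.bitwise_zero_left]

theorem pv_land_one (x : Int) : Int.land x 1 = if x.bodd then 1 else 0 := by
  have h1 : Int.land x 1 = Int.bit (x.bodd && true) (Int.land x.div2 0) := by
    conv_lhs => rw [← Int.bit_decomp x, show (1 : Int) = Int.bit true 0 from by decide, Int.land_bit]
  rw [h1, pv_land_zero_right, Int.bit_val]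
  cases x.bodd <;> simp

theorem pv_zero_land (b : Int) : Int.land 0 b = 0 := by
  cases b <;> simp [Int.land, Nat.ldiff, Nat.bitwise_zero_left]

theorem pv_main : ∀ (k : Nat) (x n : Int), x.toNat ≤ k → check x n = check_alt x n := by
  intro k
  induction k with
  | zero =>
      intro x n hx
      have hx0 : x ≤ 0 := by omega
      rw [check]
      simp only [if_neg (by omega : ¬ 0 < x)]
      unfold check_alt
      rcases lt_or_eq_of_le hx0 with h | h
      · simp [h]
      · subst h
        simp [pv_zero_land]
  | succ k ih =>
      intro x n hx
      by_cases hpos : 0 < x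
      · -- unfold one step of the loop
        have hdiv : Int.shiftRight x 1 = x / 2 := pv_shiftRight_one x
        have hdivn : Int.shiftRight n 1 = n / 2 := pv_shiftRight_one n
        have hrec : (x / 2).toNat ≤ k := by omega
        have ihx := ih (x / 2) (n / 2) hrec
        have hx2 : ¬ (x / 2 < 0) := by omega
        -- closed form one step
        have hkey := pv_land_lnot_rec x n
        have hxd : x.div2 = x / 2 := Int.div2_val x
        have hnd : n.div2 = n / 2 := Int.div2_val n
        rw [check]
        simp only [if_pos hpos]
        rw [pv_land_one x, pv_land_one n]
        unfold check_alt
        simp only [hkey, hxd, hnd]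
        have hxneg : ¬ (x < 0) := by omega
        unfold check_alt at ihx
        cases hbx : x.bodd <;> cases hbn : n.bodd <;>
          simp [hxneg, hx2, hdiv, hdivn, ihx, pv_bit_eq_zero]
      · rw [check]
        simp only [if_neg hpos]
        unfold check_alt
        have hx0 : x ≤ 0 := by omega
        rcases lt_or_eq_of_le hx0 with h | h
        · simp [h]
        · subst h
          simp [pv_zero_land]

-- ===== VERDICT (by name: the statement is the Claim_ definition above) =====
theorem check_spec : Claim_equal_check := by
  intro x n _
  unfold Spec_check
  exact pv_main x.toNat x n le_rfl
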